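-- pv_equiv track=rewrite | github.com/alexandraback/datacollection | solutions_1595491_1/Python/thiagoss/dancing.py | solve
-- ===== SOURCE A (Python) =====
-- def solve(surprises, best, values):
--     values.sort()
--     values.reverse()
--     surprises = int(surprises)
--     best = int(best)
--     count = 0
--     high = 3*best - 2
--     low = max(best,3*best - 4) #1 is a corner case
--     for v in values:
--         v = int(v)
--         if v >= high:
--             count += 1
--         elif v >= low and surprises:
--             count += 1
--             surprises -= 1
--     return count
-- ===== SOURCE B (Python) =====
-- def solve(surprises, best, values):
--     s = int(surprises)
--     b = int(best)
--     high = 3 * b - 2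
--     low = max(b, 3 * b - 4)
--     high_count = sum(1 for v in values if int(v) >= high)
--     mid_count = sum(1 for v in values if low <= int(v) < high)
--     return high_count + min(s, mid_count)
-- ===== Notes on version B (the rewrite author's own statement) =====
-- stated objective: simpler
-- what changed: Replaces A's in-place sort plus a stateful greedy loop that decrements the surprise budget with two independent category counts over the unsorted list combined by an arithmetic min (all mid-range values are interchangeable, so the sort and the mutable counter are unnecessary); Pre_ excludes a negative surprise budget, which is outside the problem's natural domain and on which A's truthiness test treats the budget as unlimited.
-- outside the precondition, e.g. on solve(-1, 2, [3]): A returns 1, B returns -1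
import Mathlib
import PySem

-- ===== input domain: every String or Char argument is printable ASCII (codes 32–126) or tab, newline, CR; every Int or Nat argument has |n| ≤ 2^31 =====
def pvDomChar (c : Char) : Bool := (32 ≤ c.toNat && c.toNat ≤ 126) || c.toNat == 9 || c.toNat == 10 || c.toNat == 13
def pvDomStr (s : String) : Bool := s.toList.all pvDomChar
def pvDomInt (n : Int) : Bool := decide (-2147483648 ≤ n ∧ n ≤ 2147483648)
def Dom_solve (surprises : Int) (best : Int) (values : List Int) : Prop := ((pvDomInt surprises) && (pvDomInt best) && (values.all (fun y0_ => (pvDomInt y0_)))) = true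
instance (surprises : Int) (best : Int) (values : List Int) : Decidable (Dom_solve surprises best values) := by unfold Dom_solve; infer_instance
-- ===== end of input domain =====

-- B replaces A's stateful greedy over the sorted list by two category counts plus an
-- arithmetic min (objective: simpler). Return-value equivalence only: A sorts `values`
-- in place, B does not mutate it.

-- ===== PORT A =====
def solve (surprises : Int) (best : Int) (values : List Int) : Int :=
  let vs := (PySem.List.sorted values (fun x => x) false).reverse
  let high := 3 * best - 2
  let low := max best (3 * best - 4)
  (vs.foldl (fun (st : Int × Int) v =>
      if v ≥ high then (st.1 + 1, st.2)
      else if v ≥ low ∧ st.2 ≠ 0 then (st.1 + 1, st.2 - 1)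
      else st) (0, surprises)).1

-- ===== PORT B =====
def solve_alt (surprises : Int) (best : Int) (values : List Int) : Int :=
  let high := 3 * best - 2
  let low := max best (3 * best - 4)
  let highCount : Int := (values.filter (fun v => decide (v ≥ high))).length
  let midCount : Int := (values.filter (fun v => decide (low ≤ v ∧ v < high))).length
  highCount + min surprises midCount

-- ===== PRECONDITION & SPEC =====
-- Pre_ excludes a negative surprise budget: outside the problem's natural domain (a count
-- of surprising scores), A's truthiness test there treats the budget as unlimited.
def Pre_solve (surprises : Int) (best : Int) (values : List Int) : Prop := 0 ≤ surprises
instance (surprises : Int) (best : Int) (values : List Int) : Decidable (Pre_solve surprises best values) := by unfold Pre_solve; infer_instance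
def pvWitness_solve : Int × Int × List Int := (1, 2, [3, 6, 1])

def Spec_solve (surprises : Int) (best : Int) (values : List Int) (out : Int) : Prop := out = solve_alt surprises best values
instance (surprises : Int) (best : Int) (values : List Int) (out : Int) : Decidable (Spec_solve surprises best values out) := by unfold Spec_solve; infer_instance

-- ===== CLAIM (what is proved, stated in full; the proofs are below) =====
def Claim_equal_solve : Prop := ∀ (surprises : Int) (best : Int) (values : List Int), Dom_solve surprises best values → Pre_solve surprises best values → Spec_solve surprises best values (solve surprises best values)

-- ===== LEMMAS AND PROOFS =====

-- A's loop, run from any state (c, s) with 0 ≤ s, counts c + #{v ≥ high} + min s #mid.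
theorem solve_loop_eq (high low : Int) (l : List Int) (c s : Int) (hs : 0 ≤ s) :
    (l.foldl (fun (st : Int × Int) v =>
        if v ≥ high then (st.1 + 1, st.2)
        else if v ≥ low ∧ st.2 ≠ 0 then (st.1 + 1, st.2 - 1)
        else st) (c, s)).1
    = c + ((l.filter (fun v => decide (v ≥ high))).length : Int)
        + min s ((l.filter (fun v => decide (low ≤ v ∧ v < high))).length : Int) := by
  induction l generalizing c s with
  | nil => simp; omega
  | cons v t ih =>
    by_cases hv : v ≥ high
    · have hm : ¬ (low ≤ v ∧ v < high) := by omega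
      simp [List.foldl_cons, hv, hm, ih _ _ hs]
      omega
    · by_cases hl : v ≥ low
      · have hm : (low ≤ v ∧ v < high) := by omega
        by_cases hz : s = 0
        · subst hz
          rw [List.foldl_cons, if_neg hv, if_neg (fun h => h.2 rfl), ih c 0 le_rfl]
          simp [hv, hm.1, hm.2]
          positivity
        · have hs' : (0 : Int) ≤ s - 1 := by omega
          simp [List.foldl_cons, hv, hl, hm, hz, ih _ _ hs']
          omega
      · have hm : ¬ (low ≤ v ∧ v < high) := by omega
        simp [List.foldl_cons, hv, hl, ih _ _ hs]

-- ===== VERDICT (by name: the statement is the Claim_ definition above) =====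
theorem solve_spec : Claim_equal_solve := by
  intro surprises best values _ hpre
  unfold Spec_solve solve solve_alt
  dsimp only
  have hperm : ((PySem.List.sorted values (fun x => x) false).reverse).Perm values :=
    (List.reverse_perm _).trans (PySem.List.sorted_perm values (fun x => x) false)
  rw [solve_loop_eq _ _ _ _ _ hpre]
  rw [(hperm.filter _).length_eq, (hperm.filter _).length_eq]
  omega
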